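-- pv_equiv track=rewrite | github.com/alessandrogibello/cs-polito | LAB 7.py | RowPicker
-- ===== SOURCE A (Python) =====
-- def RowPicker(row_lenght, spots):
--     count_free = 0
--     max_free = 0
--
--     for i in range(row_lenght):
--
--         # Check whether an element is considered a free spot
--         if spots[i] == "_":
--             if count_free == 0:
--                 count_starting = i
--
--             count_free += 1
--             if count_free > max_free:
--                 max_free = count_free
--                 max_starting = count_starting
--
--         else:
--             count_free = 0
--
--     return max_free, max_starting
-- ===== SOURCE B (Python) =====
-- def RowPicker(row_lenght, spots):
--     best = None  # (length, start) of the first longest free run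
--     i = 0
--     while i < row_lenght:
--         if spots[i] == "_":
--             j = i
--             while j < row_lenght and spots[j] == "_":
--                 j += 1
--             if best is None or j - i > best[0]:
--                 best = (j - i, i)
--             i = j
--         else:
--             i += 1
--     return best[0], best[1]
-- ===== Notes on version B (the rewrite author's own statement) =====
-- stated objective: alternative
-- what changed: A counts free spots with a per-index counter and incrementally updates max_free/max_starting inside the scan; B extracts each whole run of free spots with an inner while loop and compares the complete run length against the best (length, start) pair once per run.
import Mathlib
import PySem

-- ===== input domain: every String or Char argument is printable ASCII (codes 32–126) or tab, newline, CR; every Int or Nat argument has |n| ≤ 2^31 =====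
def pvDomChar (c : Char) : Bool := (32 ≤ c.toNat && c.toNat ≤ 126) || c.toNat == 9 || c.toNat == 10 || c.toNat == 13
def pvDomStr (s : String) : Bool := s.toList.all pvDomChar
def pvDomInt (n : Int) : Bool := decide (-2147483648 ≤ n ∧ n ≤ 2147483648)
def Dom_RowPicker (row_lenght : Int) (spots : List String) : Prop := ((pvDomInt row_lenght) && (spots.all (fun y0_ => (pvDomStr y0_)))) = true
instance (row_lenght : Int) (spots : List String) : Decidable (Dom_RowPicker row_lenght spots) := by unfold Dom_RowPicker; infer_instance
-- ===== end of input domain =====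

-- B replaces A's per-index free-spot counter by a two-level run-extraction scan (an inner loop
-- finds each whole free run, which is compared once); objective: alternative decomposition.

-- ===== PORT A =====
-- loop state = (count_free, max_free, count_starting, max_starting); the two locals Python may
-- leave unbound are Option Int (none = unbound; Pre_ excludes inputs where Python raises on them)
def pvStepA (spots : List String) (st : Int × Int × Option Int × Option Int) (i : Int) :
    Int × Int × Option Int × Option Int :=
  if (PySem.List.pyGet? spots i).getD "" = "_" then
    let cs := if st.1 = 0 then some i else st.2.2.1
    let cf := st.1 + 1
    if cf > st.2.1 then (cf, cf, cs, cs) else (cf, st.2.1, cs, st.2.2.2)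
  else (0, st.2.1, st.2.2.1, st.2.2.2)

def RowPicker (row_lenght : Int) (spots : List String) : Int × Int :=
  let st := (PySem.List.pyRange 0 row_lenght 1).foldl (pvStepA spots) (0, 0, none, none)
  (st.2.1, st.2.2.2.getD 0)

-- ===== PORT B =====
-- inner while loop: advance j while j < row_lenght and spots[j] is a free spot
def pvInner (n : Int) (spots : List String) (j : Int) : Int :=
  if j < n ∧ (PySem.List.pyGet? spots j).getD "" = "_" then pvInner n spots (j + 1) else j
termination_by (n - j).toNat
decreasing_by omega

-- these two are cited by pvOuter's decreasing_by (termination of the outer while loop)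
theorem pvInner_ge (n : Int) (spots : List String) (j : Int) : j ≤ pvInner n spots j := by
  fun_induction pvInner n spots j with
  | case1 j h ih => omega
  | case2 j h => omega

theorem pvInner_gt (n : Int) (spots : List String) (i : Int)
    (h : i < n ∧ (PySem.List.pyGet? spots i).getD "" = "_") : i < pvInner n spots i := by
  rw [pvInner, if_pos h]
  have := pvInner_ge n spots (i + 1)
  omega

-- 'if best is None or j - i > best[0]: best = (j - i, i)'
def pvBestUpd (best : Option (Int × Int)) (len i : Int) : Option (Int × Int) :=
  match best with
  | none => some (len, i)
  | some b => if len > b.1 then some (len, i) else best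

-- outer while loop: best = (length, start) of the first longest free run so far (none = no run yet)
def pvOuter (n : Int) (spots : List String) (i : Int) (best : Option (Int × Int)) :
    Option (Int × Int) :=
  if h : i < n then
    if hc : (PySem.List.pyGet? spots i).getD "" = "_" then
      let j := pvInner n spots i
      pvOuter n spots j (pvBestUpd best (j - i) i)
    else pvOuter n spots (i + 1) best
  else best
termination_by (n - i).toNat
decreasing_by
  · have := pvInner_gt n spots i ⟨h, hc⟩; omega
  · omega

def RowPicker_alt (row_lenght : Int) (spots : List String) : Int × Int :=
  match pvOuter row_lenght spots 0 none with
  | some (l, s) => (l, s)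
  | none => (0, 0)

-- ===== PRECONDITION & SPEC =====
-- Pre_ excludes exactly the inputs where Python A raises: row_lenght > len(spots) (IndexError) and
-- rows whose first row_lenght entries contain no "_" (UnboundLocalError on max_starting).
def Pre_RowPicker (row_lenght : Int) (spots : List String) : Prop :=
  row_lenght ≤ (spots.length : Int) ∧ "_" ∈ spots.take row_lenght.toNat
instance (row_lenght : Int) (spots : List String) : Decidable (Pre_RowPicker row_lenght spots) := by
  unfold Pre_RowPicker; infer_instance
def pvWitness_RowPicker : Int × List String := (3, ["X", "_", "_"])

def Spec_RowPicker (row_lenght : Int) (spots : List String) (out : Int × Int) : Prop := out = RowPicker_alt row_lenght spots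
instance (row_lenght : Int) (spots : List String) (out : Int × Int) : Decidable (Spec_RowPicker row_lenght spots out) := by unfold Spec_RowPicker; infer_instance

-- ===== CLAIM (what is proved, stated in full; the proofs are below) =====
def Claim_equal_RowPicker : Prop := ∀ (row_lenght : Int) (spots : List String), Dom_RowPicker row_lenght spots → Pre_RowPicker row_lenght spots → Spec_RowPicker row_lenght spots (RowPicker row_lenght spots)

-- ===== LEMMAS AND PROOFS =====

theorem pvInner_stop (n : Int) (spots : List String) (j : Int) :
    ¬ (pvInner n spots j < n ∧ (PySem.List.pyGet? spots (pvInner n spots j)).getD "" = "_") := by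
  fun_induction pvInner n spots j with
  | case1 j h ih => exact ih
  | case2 j h => exact h

-- read out the final answer of A from its loop state / of B from its best accumulator
def pvOutA (st : Int × Int × Option Int × Option Int) : Int × Int := (st.2.1, st.2.2.2.getD 0)
def pvOutB (best : Option (Int × Int)) : Int × Int :=
  match best with | some (l, s) => (l, s) | none => (0, 0)

-- invariant linking A's (max_free, max_starting) with B's best
def pvRel (mf : Int) (ms : Option Int) (best : Option (Int × Int)) : Prop :=
  (mf = 0 ∧ ms = none ∧ best = none) ∨ (∃ s, ms = some s ∧ best = some (mf, s))

-- A's loop across one whole free run, from the middle: processing k..j-1 (j = pvInner k) when the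
-- run started at s with original (mf0, ms0) and the incoming count_free is c ≥ 1
theorem pvA_run (spots : List String) (n : Int) :
    ∀ k c s mf0 ms0, 1 ≤ c →
      (PySem.List.pyRange k n 1).foldl (pvStepA spots)
          (c, max mf0 c, some s, if c > mf0 then some s else ms0)
        = (PySem.List.pyRange (pvInner n spots k) n 1).foldl (pvStepA spots)
          (c + (pvInner n spots k - k), max mf0 (c + (pvInner n spots k - k)), some s,
           if c + (pvInner n spots k - k) > mf0 then some s else ms0) := by
  intro k c s mf0 ms0 hc
  fun_induction pvInner n spots k generalizing c mf0 ms0 with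
  | case1 k h ih =>
    rw [PySem.List.pyRange_one_cons h.1, List.foldl_cons]
    have hstep : pvStepA spots (c, max mf0 c, some s, if c > mf0 then some s else ms0) k
        = (c + 1, max mf0 (c + 1), some s, if c + 1 > mf0 then some s else ms0) := by
      unfold pvStepA
      rw [if_pos h.2]
      simp only [if_neg (show ¬ c = 0 by omega)]
      by_cases h2 : c + 1 > mf0
      · rw [if_pos (show c + 1 > max mf0 c by omega), if_pos h2,
            max_eq_right (show mf0 ≤ c + 1 by omega)]
      · rw [if_neg (show ¬ c + 1 > max mf0 c by omega), if_neg h2,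
            if_neg (show ¬ c > mf0 by omega), max_eq_left (show c ≤ mf0 by omega),
            max_eq_left (show c + 1 ≤ mf0 by omega)]
    rw [hstep, ih (c + 1) mf0 ms0 (by omega)]
    have e : c + 1 + (pvInner n spots (k + 1) - (k + 1)) = c + (pvInner n spots (k + 1) - k) := by
      ring
    rw [e]
  | case2 k h =>
    simp only [sub_self, add_zero]

-- main simulation lemma: from any run boundary (count_free = 0), A's remaining loop and B's
-- remaining outer loop produce the same answer, given the invariant on the accumulators
theorem pvMain (spots : List String) (n : Int) :
    ∀ i mf cs ms best, pvRel mf ms best →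
      pvOutA ((PySem.List.pyRange i n 1).foldl (pvStepA spots) (0, mf, cs, ms))
        = pvOutB (pvOuter n spots i best) := by
  have H : ∀ m : Nat, ∀ i mf cs ms best, (n - i).toNat = m → pvRel mf ms best →
      pvOutA ((PySem.List.pyRange i n 1).foldl (pvStepA spots) (0, mf, cs, ms))
        = pvOutB (pvOuter n spots i best) := by
    intro m
    induction m using Nat.strong_induction_on with
    | _ m ih =>
      intro i mf cs ms best hm hrel
      by_cases hin : i < n
      · by_cases hc : (PySem.List.pyGet? spots i).getD "" = "_"
        · -- free spot at i: a run starts here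
          rw [PySem.List.pyRange_one_cons hin, List.foldl_cons]
          have hstep : pvStepA spots (0, mf, cs, ms) i
              = (1, max mf 1, some i, if (1 : Int) > mf then some i else ms) := by
            unfold pvStepA
            rw [if_pos hc]
            simp only [if_true, zero_add]
            by_cases h1 : (1 : Int) > mf
            · rw [if_pos h1, if_pos h1, max_eq_right (show mf ≤ 1 by omega)]
            · rw [if_neg h1, if_neg h1, max_eq_left (show (1 : Int) ≤ mf by omega)]
          rw [hstep, pvA_run spots n (i + 1) 1 i mf ms le_rfl]
          set j' := pvInner n spots (i + 1) with hj'
          have hj : pvInner n spots i = j' := by rw [pvInner, if_pos ⟨hin, hc⟩]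
          have hji : i < j' := by have := pvInner_ge n spots (i + 1); omega
          have e : 1 + (j' - (i + 1)) = j' - i := by ring
          rw [e]
          -- B side steps into the run once, to j'
          rw [pvOuter, dif_pos hin, dif_pos hc]
          simp only [hj]
          have hstop : ¬ (j' < n ∧ (PySem.List.pyGet? spots j').getD "" = "_") := by
            have := pvInner_stop n spots (i + 1); rw [← hj'] at this; exact this
          -- the updated accumulators still satisfy the invariant
          have hbest : ∃ s, (if j' - i > mf then some i else ms) = some s ∧
              pvBestUpd best (j' - i) i = some (max mf (j' - i), s) := by
            rcases hrel with ⟨h1, h2, h3⟩ | ⟨s, h2, h3⟩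
            · subst h1; subst h2; subst h3
              refine ⟨i, if_pos (by omega), ?_⟩
              simp only [pvBestUpd, Option.some.injEq, Prod.mk.injEq]
              exact ⟨by omega, trivial⟩
            · subst h2; subst h3
              by_cases hgt : j' - i > mf
              · refine ⟨i, if_pos hgt, ?_⟩
                simp only [pvBestUpd]
                rw [if_pos (show j' - i > (mf, s).1 from hgt)]
                simp only [Option.some.injEq, Prod.mk.injEq]
                exact ⟨by omega, trivial⟩
              · refine ⟨s, if_neg hgt, ?_⟩
                simp only [pvBestUpd]
                rw [if_neg (show ¬ j' - i > (mf, s).1 from hgt)]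
                simp only [Option.some.injEq, Prod.mk.injEq]
                exact ⟨by omega, trivial⟩
          by_cases hjn : j' < n
          · -- the run ends at a non-free spot j' < n: A resets, B moves on to j' + 1
            have hcj : ¬ (PySem.List.pyGet? spots j').getD "" = "_" := fun hco => hstop ⟨hjn, hco⟩
            rw [PySem.List.pyRange_one_cons hjn, List.foldl_cons]
            have hstep2 : pvStepA spots (j' - i, max mf (j' - i), some i,
                if j' - i > mf then some i else ms) j'
                = (0, max mf (j' - i), some i, if j' - i > mf then some i else ms) := by
              unfold pvStepA
              rw [if_neg hcj]
            rw [hstep2, pvOuter, dif_pos hjn, dif_neg hcj]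
            obtain ⟨s, h2, h3⟩ := hbest
            exact ih ((n - (j' + 1)).toNat) (by omega) (j' + 1) _ _ _ _ rfl (Or.inr ⟨s, h2, h3⟩)
          · -- the run reaches row_lenght: both loops end
            have hr : PySem.List.pyRange j' n 1 = [] := by
              rw [PySem.List.pyRange_one, show ((n - j').toNat = 0) by omega]
              simp
            rw [hr, List.foldl_nil, pvOuter, dif_neg hjn]
            obtain ⟨s, h2, h3⟩ := hbest
            rw [h3]
            simp [pvOutA, pvOutB, h2]
        · -- not a free spot: A keeps count_free = 0, B steps to i + 1
          rw [PySem.List.pyRange_one_cons hin, List.foldl_cons]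
          have hstep : pvStepA spots (0, mf, cs, ms) i = (0, mf, cs, ms) := by
            unfold pvStepA; rw [if_neg hc]
          rw [hstep, pvOuter, dif_pos hin, dif_neg hc]
          exact ih ((n - (i + 1)).toNat) (by omega) (i + 1) _ _ _ _ rfl hrel
      · -- loop over: read out the answers
        have hr : PySem.List.pyRange i n 1 = [] := by
          rw [PySem.List.pyRange_one, show ((n - i).toNat = 0) by omega]
          simp
        rw [hr, List.foldl_nil, pvOuter, dif_neg hin]
        rcases hrel with ⟨h1, h2, h3⟩ | ⟨s, h2, h3⟩
        · simp [pvOutA, pvOutB, h1, h2, h3]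
        · simp [pvOutA, pvOutB, h2, h3]
  intro i mf cs ms best hrel
  exact H ((n - i).toNat) i mf cs ms best rfl hrel

-- ===== VERDICT (by name: the statement is the Claim_ definition above) =====
theorem RowPicker_spec : Claim_equal_RowPicker := by
  intro rl spots _ _
  unfold Spec_RowPicker RowPicker RowPicker_alt
  have h := pvMain spots rl 0 0 none none none (Or.inl ⟨rfl, rfl, rfl⟩)
  simpa [pvOutA, pvOutB] using h
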